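-- pv_equiv track=rewrite | github.com/ttdantett/Cryptography | basic_transposition/transposition.py | create_transposition_table
-- ===== SOURCE A (Python) =====
-- def create_transposition_table(_key, enc):
-- 	"""Creation of the transposition table"""
-- 	# Creation of a table containing a tuple (key, index)
-- 	l = []
-- 	m = [''] * len(_key)
-- 	for i in range(len(_key)):
-- 		l.append((_key[i], i))
-- 	# Sort the  table
-- 	l.sort()
-- 	for i in range(len(l)):
-- 		#if encryption
-- 		if enc:
-- 			m[l[i][1]] = i
-- 		# if decryption
-- 		else:
-- 			m[i] = l[i][1]
-- 	return m
-- ===== SOURCE B (Python) =====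
-- def create_transposition_table(_key, enc):
-- 	"""Creation of the transposition table (bucket/counting approach)"""
-- 	buckets = {}
-- 	for i, c in enumerate(_key):
-- 		buckets.setdefault(c, []).append(i)
-- 	m = [0] * len(_key)
-- 	rank = 0
-- 	for c in sorted(buckets):
-- 		for i in buckets[c]:
-- 			if enc:
-- 				m[i] = rank
-- 			else:
-- 				m[rank] = i
-- 			rank += 1
-- 	return m
-- ===== Notes on version B (the rewrite author's own statement) =====
-- stated objective: alternative
-- what changed: Replaces A's build-all-(char,index)-pairs-and-comparison-sort with a single bucket pass that records each character's positions in a dict, then walks the distinct characters in sorted order with a running rank counter, which reproduces A's stable tie-break by original index.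
import Mathlib
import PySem

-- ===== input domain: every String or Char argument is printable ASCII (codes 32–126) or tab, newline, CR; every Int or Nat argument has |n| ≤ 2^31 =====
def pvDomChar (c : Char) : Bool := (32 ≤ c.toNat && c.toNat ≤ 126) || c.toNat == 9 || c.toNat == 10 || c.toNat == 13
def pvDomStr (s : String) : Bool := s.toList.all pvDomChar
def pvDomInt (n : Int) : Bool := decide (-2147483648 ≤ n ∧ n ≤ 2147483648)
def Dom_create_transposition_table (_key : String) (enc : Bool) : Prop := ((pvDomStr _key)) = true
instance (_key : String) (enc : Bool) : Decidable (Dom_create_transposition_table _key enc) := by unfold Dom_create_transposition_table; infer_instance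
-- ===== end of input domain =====

-- B replaces A's build-pairs-and-comparison-sort by a bucket pass (positions per character,
-- then distinct characters in sorted order with a running rank); objective: alternative decomposition.

-- ===== PORT A =====
-- l.sort() on (char, index) tuples is Python's lexicographic tuple order = toLex on Char × Nat.
-- m = [''] * len(_key): every cell is overwritten before return, so the Int port initialises with 0.
def create_transposition_table (_key : String) (enc : Bool) : List Int :=
  let cs := _key.toList
  let l : List (Char × Nat) :=
    (List.range cs.length).foldl (fun l i => l ++ [(cs.getD i ' ', i)]) []
  let ls := PySem.List.sorted l (fun p => (toLex p : Char ×ₗ Nat)) false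
  (List.range ls.length).foldl
    (fun m i =>
      if enc then m.set (ls.getD i (' ', 0)).2 (i : Int)
      else m.set i ((ls.getD i (' ', 0)).2 : Int))
    (List.replicate cs.length 0)

-- ===== PORT B =====
-- buckets.setdefault(c, []).append(i)  =  d.modify c [] (· ++ [i]); enumerate = zipIdx;
-- sorted(buckets) iterates the dict's keys in sorted order; rank is threaded as the second state component.
def create_transposition_table_alt (_key : String) (enc : Bool) : List Int :=
  let cs := _key.toList
  let buckets : PySem.Dict Char (List Nat) :=
    cs.zipIdx.foldl (fun d p => d.modify p.1 [] (· ++ [p.2])) PySem.Dict.empty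
  let res :=
    (PySem.List.sorted buckets.keys (fun c => c) false).foldl
      (fun s c =>
        (buckets.getD c []).foldl
          (fun (s : List Int × Nat) i =>
            (if enc then s.1.set i (s.2 : Int) else s.1.set s.2 (i : Int), s.2 + 1))
          s)
      (List.replicate cs.length 0, 0)
  res.1

-- ===== PRECONDITION & SPEC =====
def Spec_create_transposition_table (_key : String) (enc : Bool) (out : List Int) : Prop := out = create_transposition_table_alt _key enc
instance (_key : String) (enc : Bool) (out : List Int) : Decidable (Spec_create_transposition_table _key enc out) := by unfold Spec_create_transposition_table; infer_instance

-- ===== CLAIM (what is proved, stated in full; the proofs are below) =====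
def Claim_equal_create_transposition_table : Prop := ∀ (_key : String) (enc : Bool), Dom_create_transposition_table _key enc → Spec_create_transposition_table _key enc (create_transposition_table _key enc)

-- ===== LEMMAS AND PROOFS =====

-- A's first loop builds exactly cs.zipIdx.
theorem pairs_eq_zipIdx (cs : List Char) :
    (List.range cs.length).foldl (fun l i => l ++ [(cs.getD i ' ', i)]) [] = cs.zipIdx := by
  rw [PySem.List.foldl_append_singleton_eq_map]
  apply List.ext_getElem
  · simp
  · intro i hi _
    simp only [List.getElem_zipIdx, List.getElem_map, List.getD_eq_getElem?_getD]
    simp [List.getElem?_eq_getElem (by simpa using hi)]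

-- the flatMap over distinct keys of per-key filters is a permutation of the original list
theorem perm_flatMap_filter (K : List Char) :
    ∀ (P : List (Char × Nat)), K.Nodup → (∀ p ∈ P, p.1 ∈ K) →
      (K.flatMap (fun c => P.filter (fun p => p.1 == c))).Perm P := by
  induction K with
  | nil =>
    intro P _ hall
    have : P = [] := by
      cases P with
      | nil => rfl
      | cons q Q => exact absurd (hall q (by simp)) (by simp)
    simp [this]
  | cons c K ih =>
    intro P hnd hall
    have hrewrite : ∀ c' ∈ K, P.filter (fun p => p.1 == c')
        = (P.filter (fun p => !(p.1 == c))).filter (fun p => p.1 == c') := by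
      intro c' hc'
      rw [List.filter_filter]
      apply List.filter_congr
      intro p _
      have hcc : ¬ (c' = c) := fun hh => (List.nodup_cons.mp hnd).1 (hh ▸ hc')
      by_cases h : p.1 = c' <;> simp [h, hcc]
    have hflat : (K.flatMap (fun c' => P.filter (fun p => p.1 == c')) : List (Char × Nat))
        = K.flatMap (fun c' => (P.filter (fun p => !(p.1 == c))).filter (fun p => p.1 == c')) :=
      List.flatMap_congr (fun c' hc' => hrewrite c' hc')
    have hperm := ih (P.filter (fun p => !(p.1 == c))) (List.nodup_cons.mp hnd).2 (by
      intro p hp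
      simp only [List.mem_filter] at hp
      have := hall p hp.1
      simp only [List.mem_cons] at this
      rcases this with h | h
      · exact absurd h (by simpa using hp.2)
      · exact h)
    have hsplit : ((c :: K).flatMap (fun c' => P.filter (fun p => p.1 == c')))
        = P.filter (fun p => p.1 == c)
            ++ K.flatMap (fun c' => (P.filter (fun p => !(p.1 == c))).filter (fun p => p.1 == c')) := by
      simp only [List.flatMap_cons, hflat]
    rw [hsplit]
    exact (hperm.append_left (P.filter (fun p => p.1 == c))).trans
      (List.filter_append_perm (fun p => p.1 == c) P)

-- cs.zipIdx has strictly increasing second components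
theorem zipIdx_snd_lt (cs : List Char) :
    (cs.zipIdx).Pairwise (fun p q => p.2 < q.2) := by
  rw [List.pairwise_iff_getElem]
  intro i j hi hj hij
  simp only [List.getElem_zipIdx]
  omega

-- the bucket-ordered concatenation, as pairs
def pvBlocks (cs : List Char) : List (Char × Nat) :=
  (PySem.List.sorted (PySem.Set.ofList cs) (fun c => c) false).flatMap
    (fun c => cs.zipIdx.filter (fun p => p.1 == c))

-- A's sorted pair list IS the bucket-ordered concatenation
theorem sorted_eq_blocks (cs : List Char) :
    PySem.List.sorted cs.zipIdx (fun p => (toLex p : Char ×ₗ Nat)) false = pvBlocks cs := by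
  apply PySem.List.sorted_eq_of_perm_of_pairwise_lt
  · -- permutation
    apply perm_flatMap_filter
    · exact (PySem.List.sorted_perm _ _ _).nodup_iff.mpr (PySem.Set.nodup_ofList cs)
    · intro p hp
      rw [PySem.List.mem_sorted, PySem.Set.mem_ofList]
      have : p.1 ∈ cs.zipIdx.map (·.1) := List.mem_map_of_mem hp
      simpa using this
  · -- strictly increasing in lex order
    unfold pvBlocks
    rw [List.flatMap_def, List.pairwise_flatten]
    constructor
    · intro l hl
      simp only [List.mem_map] at hl
      obtain ⟨c, _, rfl⟩ := hl
      have h1 : (cs.zipIdx.filter (fun p => p.1 == c)).Pairwise (fun p q => p.2 < q.2) :=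
        List.Pairwise.sublist (List.filter_sublist ..) (zipIdx_snd_lt cs)
      refine h1.imp_of_mem ?_
      intro p q hp hq h
      have hp1 : p.1 = c := by simpa using (List.mem_filter.mp hp).2
      have hq1 : q.1 = c := by simpa using (List.mem_filter.mp hq).2
      rw [Prod.Lex.toLex_lt_toLex]
      exact Or.inr ⟨hp1.trans hq1.symm, h⟩
    · have hK : (PySem.List.sorted (PySem.Set.ofList cs) (fun c => c) false).Pairwise (· < ·) := by
        have hle := PySem.List.sorted_pairwise (PySem.Set.ofList cs) (fun c => c)
        have hnd : (PySem.List.sorted (PySem.Set.ofList cs) (fun c => c) false).Nodup :=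
          (PySem.List.sorted_perm _ _ _).nodup_iff.mpr (PySem.Set.nodup_ofList cs)
        refine (hle.and hnd).imp ?_
        intro a b ⟨h1, h2⟩
        exact lt_of_le_of_ne h1 h2
      rw [List.pairwise_map]
      refine hK.imp_of_mem ?_
      intro c1 c2 _ _ hlt p hp q hq
      have hp1 : p.1 = c1 := by simpa using (List.mem_filter.mp hp).2
      have hq1 : q.1 = c2 := by simpa using (List.mem_filter.mp hq).2
      rw [Prod.Lex.toLex_lt_toLex]
      exact Or.inl (by rw [hp1, hq1]; exact hlt)

-- a fold that threads a counter in the state equals a fold over zipIdx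
theorem fold_counter {σ β : Type} (g : σ → Nat → β → σ) :
    ∀ (l : List β) (a : σ) (r : Nat),
      l.foldl (fun s x => (g s.1 s.2 x, s.2 + 1)) (a, r)
        = ((l.zipIdx r).foldl (fun m q => g m q.2 q.1) a, r + l.length) := by
  intro l
  induction l with
  | nil => intro a r; simp
  | cons x l ih => intro a r; simp [List.zipIdx_cons, ih]; omega

-- A's second loop, indexed over range, equals a fold over the zipIdx of the sorted list
theorem range_fold_eq_zipIdx_fold {σ : Type} (g : σ → Nat → Char × Nat → σ)
    (xs : List (Char × Nat)) (a : σ) :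
    (List.range xs.length).foldl (fun m i => g m i (xs.getD i (' ', 0))) a
      = (xs.zipIdx).foldl (fun m q => g m q.2 q.1) a := by
  have h : xs.zipIdx = (List.range xs.length).map (fun i => (xs.getD i (' ', 0), i)) := by
    apply List.ext_getElem
    · simp
    · intro i hi _
      simp only [List.getElem_zipIdx, List.getElem_map, List.getElem_range, List.getD_eq_getElem?_getD]
      simp [List.getElem?_eq_getElem (by simpa using hi)]
  rw [h, List.foldl_map]

theorem create_transposition_table_eq_alt (_key : String) (enc : Bool) :
    create_transposition_table _key enc = create_transposition_table_alt _key enc := by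
  unfold create_transposition_table create_transposition_table_alt
  simp only [pairs_eq_zipIdx, sorted_eq_blocks]
  set cs := _key.toList with hcs
  have hkeys : (cs.zipIdx.foldl (fun d p => d.modify p.1 [] (· ++ [p.2]))
      (PySem.Dict.empty : PySem.Dict Char (List Nat))).keys = PySem.Set.ofList cs := by
    rw [PySem.Dict.keys_foldl_modify_key cs.zipIdx Prod.fst [] (fun _ p => (· ++ [p.2]))]
    simp [PySem.Dict.empty, PySem.Set.update, PySem.Set.ofList]
  have hget : ∀ c, (cs.zipIdx.foldl (fun d p => d.modify p.1 [] (· ++ [p.2]))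
      (PySem.Dict.empty : PySem.Dict Char (List Nat))).getD c []
      = (cs.zipIdx.filter (fun p => p.1 == c)).map (·.2) := by
    intro c
    rw [PySem.Dict.getD_foldl_modify_append]
    simp [PySem.Dict.empty, PySem.Dict.getD, PySem.Dict.get?]
  rw [hkeys]
  simp only [hget]
  rw [← List.foldl_flatMap]
  have hflat : (List.flatMap (fun c => List.map (fun x => x.2) (List.filter (fun p => p.1 == c) cs.zipIdx))
      (PySem.List.sorted (PySem.Set.ofList cs) fun c => c)) = (pvBlocks cs).map (·.2) := by
    rw [pvBlocks, List.map_flatMap]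
  rw [hflat]
  have hB := fold_counter
    (fun (m : List Int) (r : Nat) (i : Nat) => if enc = true then m.set i (r : Int) else m.set r (i : Int))
    ((pvBlocks cs).map (·.2)) (List.replicate cs.length 0) 0
  refine Eq.trans (range_fold_eq_zipIdx_fold
    (fun (m : List Int) i p => if enc = true then m.set p.2 (i : Int) else m.set i ((p.2 : Int))) (pvBlocks cs) _) ?_
  refine Eq.trans ?_ (congrArg Prod.fst hB).symm
  rw [List.zipIdx_map, List.foldl_map]
  rfl

-- ===== VERDICT (by name: the statement is the Claim_ definition above) =====
theorem create_transposition_table_spec : Claim_equal_create_transposition_table := by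
  intro _key enc _
  exact create_transposition_table_eq_alt _key enc
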